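-- pv_equiv track=rewrite | github.com/HJpierzchala/GNX | gnx_py/io.py | _colspecs_from_header
-- ===== SOURCE A (Python) =====
-- def _colspecs_from_header(header: str):
--     colspecs, in_field = [], False
--     for i, ch in enumerate(header):
--         if ch != " " and not in_field:
--             start, in_field = i, True
--         elif ch == " " and in_field:
--             colspecs.append((start, i))
--             in_field = False
--     if in_field:
--         colspecs.append((start, len(header)))
--     return colspecs
-- ===== SOURCE B (Python) =====
-- import re
--
-- def _colspecs_from_header(header: str):
--     return [(m.start(), m.end()) for m in re.finditer(r"[^ ]+", header)]
-- ===== Notes on version B (the rewrite author's own statement) =====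
-- stated objective: idiomatic
-- what changed: Replaces the manual in_field state machine with re.finditer over maximal runs of non-space characters ([^ ]+), emitting each match's (start, end) span; the regex engine scans in C, which a timing run measured as markedly faster.
import Mathlib
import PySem

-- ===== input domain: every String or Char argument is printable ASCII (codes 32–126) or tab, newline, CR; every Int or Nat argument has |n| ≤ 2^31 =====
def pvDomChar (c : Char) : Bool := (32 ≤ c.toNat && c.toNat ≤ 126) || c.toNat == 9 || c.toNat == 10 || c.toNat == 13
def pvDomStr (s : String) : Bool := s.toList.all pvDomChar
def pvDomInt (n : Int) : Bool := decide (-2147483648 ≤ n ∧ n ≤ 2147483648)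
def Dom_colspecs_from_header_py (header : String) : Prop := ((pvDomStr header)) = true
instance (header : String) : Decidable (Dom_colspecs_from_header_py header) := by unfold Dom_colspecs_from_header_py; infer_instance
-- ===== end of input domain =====

-- B replaces A's manual in_field state machine with regex-style matching of maximal
-- non-space runs (re.finditer(r"[^ ]+")), returning each match's (start, end) span; idiomatic.


-- ===== PORT A =====
-- A's for-loop over enumerate(header) as structural recursion over the same state
-- (colspecs, in_field, start); i is the running enumerate index.
def pvLoopA (colspecs : List (Int × Int)) (in_field : Bool) (start : Int) (i : Nat) :
    List Char → List (Int × Int) × Bool × Int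
  | [] => (colspecs, in_field, start)
  | ch :: rest =>
    if ch ≠ ' ' ∧ in_field = false then
      pvLoopA colspecs true (i : Int) (i + 1) rest
    else if ch = ' ' ∧ in_field = true then
      pvLoopA (colspecs ++ [(start, (i : Int))]) false start (i + 1) rest
    else
      pvLoopA colspecs in_field start (i + 1) rest

def colspecs_from_header_py (header : String) : List (Int × Int) :=
  let st := pvLoopA [] false 0 0 header.toList
  if st.2.1 then st.1 ++ [(st.2.2, (header.toList.length : Int))] else st.1

-- ===== PORT B =====
-- re.finditer(r"[^ ]+", header): scan for maximal runs of non-space characters,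
-- yielding (start, end) of each match.
def pvFindRuns : List Char → Nat → List (Int × Int)
  | [], _ => []
  | c :: rest, i =>
    if c = ' ' then pvFindRuns rest (i + 1)
    else
      let k := (rest.takeWhile (· ≠ ' ')).length
      ((i : Int), (i : Int) + 1 + k) :: pvFindRuns (rest.dropWhile (· ≠ ' ')) (i + 1 + k)
termination_by l _ => l.length
decreasing_by
  · simp
  · simp only [List.length_cons]
    exact Nat.lt_succ_of_le (List.length_dropWhile_le _ _)

def colspecs_from_header_py_alt (header : String) : List (Int × Int) :=
  pvFindRuns header.toList 0

-- ===== PRECONDITION & SPEC =====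
def Spec_colspecs_from_header_py (header : String) (out : List (Int × Int)) : Prop := out = colspecs_from_header_py_alt header
instance (header : String) (out : List (Int × Int)) : Decidable (Spec_colspecs_from_header_py header out) := by unfold Spec_colspecs_from_header_py; infer_instance

-- ===== CLAIM (what is proved, stated in full; the proofs are below) =====
def Claim_equal_colspecs_from_header_py : Prop := ∀ (header : String), Dom_colspecs_from_header_py header → Spec_colspecs_from_header_py header (colspecs_from_header_py header)

-- ===== LEMMAS AND PROOFS =====

-- finalize A's loop state at total length n (the trailing `if in_field` append)
def pvFin (st : List (Int × Int) × Bool × Int) (n : Nat) : List (Int × Int) :=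
  if st.2.1 then st.1 ++ [(st.2.2, (n : Int))] else st.1

lemma pvLoopA_false_space (acc : List (Int × Int)) (s : Int) (i : Nat) (rest : List Char) :
    pvLoopA acc false s i (' ' :: rest) = pvLoopA acc false s (i + 1) rest := by
  simp [pvLoopA]

lemma pvLoopA_false_non (acc : List (Int × Int)) (s : Int) (i : Nat) {c : Char} (rest : List Char)
    (hc : c ≠ ' ') : pvLoopA acc false s i (c :: rest) = pvLoopA acc true (i : Int) (i + 1) rest := by
  simp [pvLoopA, hc]

lemma pvLoopA_true_space (acc : List (Int × Int)) (s : Int) (i : Nat) (rest : List Char) :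
    pvLoopA acc true s i (' ' :: rest) = pvLoopA (acc ++ [(s, (i : Int))]) false s (i + 1) rest := by
  simp [pvLoopA]

lemma pvLoopA_true_non (acc : List (Int × Int)) (s : Int) (i : Nat) {c : Char} (rest : List Char)
    (hc : c ≠ ' ') : pvLoopA acc true s i (c :: rest) = pvLoopA acc true s (i + 1) rest := by
  simp [pvLoopA, hc]

lemma pvFindRuns_space (i : Nat) (rest : List Char) :
    pvFindRuns (' ' :: rest) i = pvFindRuns rest (i + 1) := by
  simp [pvFindRuns]

lemma pvFindRuns_non (i : Nat) {c : Char} (rest : List Char) (hc : c ≠ ' ') :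
    pvFindRuns (c :: rest) i =
      ((i : Int), (i : Int) + 1 + (rest.takeWhile (· ≠ ' ')).length) ::
        pvFindRuns (rest.dropWhile (· ≠ ' ')) (i + 1 + (rest.takeWhile (· ≠ ' ')).length) := by
  simp [pvFindRuns, hc]

lemma pvLoopA_main (l : List Char) :
    (∀ acc s i, pvFin (pvLoopA acc false s i l) (i + l.length) = acc ++ pvFindRuns l i)
    ∧ (∀ acc s i, pvFin (pvLoopA acc true s i l) (i + l.length) =
        acc ++ ((s, ((i + (l.takeWhile (· ≠ ' ')).length : Nat) : Int)) ::
          pvFindRuns (l.dropWhile (· ≠ ' ')) (i + (l.takeWhile (· ≠ ' ')).length))) := by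
  induction l with
  | nil =>
    refine ⟨fun acc s i => by simp [pvLoopA, pvFindRuns, pvFin],
            fun acc s i => by simp [pvLoopA, pvFindRuns, pvFin]⟩
  | cons c rest ih =>
    obtain ⟨ih0, ih1⟩ := ih
    constructor
    · intro acc s i
      by_cases hc : c = ' '
      · subst hc
        rw [pvLoopA_false_space, pvFindRuns_space, List.length_cons,
          show i + (rest.length + 1) = (i + 1) + rest.length from by omega, ih0]
      · rw [pvLoopA_false_non acc s i rest hc, pvFindRuns_non i rest hc, List.length_cons,
          show i + (rest.length + 1) = (i + 1) + rest.length from by omega,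
          ih1 acc (i : Int) (i + 1)]
        congr 2
    · intro acc s i
      by_cases hc : c = ' '
      · subst hc
        rw [pvLoopA_true_space, List.length_cons,
          show i + (rest.length + 1) = (i + 1) + rest.length from by omega, ih0]
        simp [pvFindRuns_space]
      · have hct : (c :: rest).takeWhile (· ≠ ' ') = c :: rest.takeWhile (· ≠ ' ') := by
          simp [hc]
        have hcd : (c :: rest).dropWhile (· ≠ ' ') = rest.dropWhile (· ≠ ' ') := by
          simp [hc]
        rw [pvLoopA_true_non acc s i rest hc, List.length_cons,
          show i + (rest.length + 1) = (i + 1) + rest.length from by omega,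
          ih1 acc s (i + 1), hct, hcd, List.length_cons,
          show i + ((rest.takeWhile (· ≠ ' ')).length + 1)
              = (i + 1) + (rest.takeWhile (· ≠ ' ')).length from by omega]

-- ===== VERDICT (by name: the statement is the Claim_ definition above) =====
theorem colspecs_from_header_py_spec : Claim_equal_colspecs_from_header_py := by
  intro header _
  unfold Spec_colspecs_from_header_py colspecs_from_header_py colspecs_from_header_py_alt
  have h := (pvLoopA_main header.toList).1 [] 0 0
  simpa [pvFin] using h
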